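-- pv_equiv track=rewrite | github.com/Xrenya/Algorithms | yandex/Lecture_7/Contest/A/main.py | leftstudents
-- ===== SOURCE A (Python) =====
-- def leftstudents(students, teachers, events):
--     cnt = 0
--     watchers = 0
--     for i in range(len(events)):
--         if watchers > 0:
--             cnt += events[i][0] - events[i-1][0]
--         if events[i][1] == -1:
--             watchers += 1
--         else:
--             watchers -= 1
--         if watchers == 0:
--             cnt += 1
--     return students - cnt
-- ===== SOURCE B (Python) =====
-- def leftstudents(students, teachers, events):
--     # Run-based algorithm: instead of adding each inter-event gap one by one,
--     # detect each maximal run of events with positive watcher level and add its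
--     # telescoped time span (end timestamp - start timestamp) in one step; the
--     # +1 bonuses are the number of events at which the level is exactly 0.
--     n = len(events)
--     levels = []
--     lv = 0
--     for _, t in events:
--         lv += 1 if t == -1 else -1
--         levels.append(lv)
--     cnt = levels.count(0)
--     i = 0
--     while i < n:
--         if levels[i] > 0:
--             j = i
--             while j + 1 < n and levels[j + 1] > 0:
--                 j += 1
--             cnt += events[min(j + 1, n - 1)][0] - events[i][0]
--             i = j + 1
--         else:
--             i += 1
--     return students - cnt
-- ===== Notes on version B (the rewrite author's own statement) =====
-- stated objective: alternative
-- what changed: A's single interleaved pass that adds each inter-event time gap while the watcher counter is positive is replaced by a run-based algorithm: build the level timeline, count zero-level events, and for each maximal run of positive-level events add its telescoped time span (end timestamp minus start timestamp) in one step via a nested run-extending scan.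
import Mathlib
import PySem

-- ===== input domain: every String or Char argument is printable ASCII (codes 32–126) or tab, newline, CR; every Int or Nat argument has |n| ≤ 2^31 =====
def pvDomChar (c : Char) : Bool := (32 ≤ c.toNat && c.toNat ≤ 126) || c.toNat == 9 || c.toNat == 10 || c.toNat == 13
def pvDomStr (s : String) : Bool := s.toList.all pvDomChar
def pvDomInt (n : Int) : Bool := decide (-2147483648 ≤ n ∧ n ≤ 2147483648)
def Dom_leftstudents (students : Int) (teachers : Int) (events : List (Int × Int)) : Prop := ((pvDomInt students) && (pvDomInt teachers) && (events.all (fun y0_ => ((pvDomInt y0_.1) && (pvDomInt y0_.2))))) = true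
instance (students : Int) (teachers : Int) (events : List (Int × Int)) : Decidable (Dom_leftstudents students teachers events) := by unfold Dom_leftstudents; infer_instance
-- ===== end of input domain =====

-- B replaces A's single interleaved pass (per-index gap additions guarded by a
-- live counter) by a run-based algorithm: count zero-level events, then detect
-- each maximal run of positive-level events with a nested scan and add its
-- telescoped time span in one step; objective: alternative structure, same cost.

-- ===== PORT A =====
-- A's loop body as a helper; every index access is in range in Python (the
-- i-1 read is guarded by watchers > 0, which is false at i = 0, so Python's
-- negative indexing is only applied to in-range offsets; pyGetD reproduces
-- Python indexing exactly, its default is never reached).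
def leftstudentsStep (events : List (Int × Int)) (st : Int × Int) (i : Int) : Int × Int :=
  let cnt1 := if st.2 > 0 then
      st.1 + ((PySem.List.pyGetD events i (0, 0)).1 - (PySem.List.pyGetD events (i - 1) (0, 0)).1)
    else st.1
  let w' := if (PySem.List.pyGetD events i (0, 0)).2 == -1 then st.2 + 1 else st.2 - 1
  (if w' == 0 then cnt1 + 1 else cnt1, w')

def leftstudents (students : Int) (teachers : Int) (events : List (Int × Int)) : Int :=
  let res := (PySem.List.pyRange 0 (events.length : Int) 1).foldl (leftstudentsStep events) (0, 0)
  students - res.1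

-- ===== PORT B =====
-- termination facts for B's nested while loops (cited in decreasing_by)
def altInner (levels : List Int) (n j : Nat) : Nat :=
  if h : j + 1 < n ∧ levels.getD (j + 1) 0 > 0 then altInner levels n (j + 1) else j
termination_by n - j
decreasing_by omega

lemma altInner_ge (levels : List Int) (n : Nat) : ∀ (m j : Nat), n - j ≤ m → j ≤ altInner levels n j := by
  intro m
  induction m with
  | zero =>
    intro j hm
    rw [altInner]
    split_ifs with h'
    · exact absurd h'.1 (by omega)
    · omega
  | succ m ih =>
    intro j hm
    rw [altInner]
    split_ifs with h'
    · have := ih (j + 1) (by omega)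
      omega
    · omega

-- the run-extracting outer while loop; all list accesses are in range in Python
-- (getD defaults are never reached), exact on those inputs
def altOuter (events : List (Int × Int)) (levels : List Int) (n i : Nat) (cnt : Int) : Int :=
  if h : i < n then
    if levels.getD i 0 > 0 then
      altOuter events levels n (altInner levels n i + 1)
        (cnt + ((events.getD (min (altInner levels n i + 1) (n - 1)) (0, 0)).1
                 - (events.getD i (0, 0)).1))
    else altOuter events levels n (i + 1) cnt
  else cnt
termination_by n - i
decreasing_by
  · have := altInner_ge levels n (n - i) i (by omega); omega
  · omega

def leftstudents_alt (students : Int) (teachers : Int) (events : List (Int × Int)) : Int :=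
  let n := events.length
  let levels := (events.foldl
    (fun (st : List Int × Int) e =>
      let lv := st.2 + (if e.2 == -1 then (1 : Int) else -1)
      (st.1 ++ [lv], lv)) ([], 0)).1
  students - altOuter events levels n 0 ((levels.count 0 : Int))

-- ===== PRECONDITION & SPEC =====
def Spec_leftstudents (students : Int) (teachers : Int) (events : List (Int × Int)) (out : Int) : Prop := out = leftstudents_alt students teachers events
instance (students : Int) (teachers : Int) (events : List (Int × Int)) (out : Int) : Decidable (Spec_leftstudents students teachers events out) := by unfold Spec_leftstudents; infer_instance

-- ===== CLAIM (what is proved, stated in full; the proofs are below) =====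
def Claim_equal_leftstudents : Prop := ∀ (students : Int) (teachers : Int) (events : List (Int × Int)), Dom_leftstudents students teachers events → Spec_leftstudents students teachers events (leftstudents students teachers events)

-- ===== LEMMAS AND PROOFS =====

-- canonical structural count: the time gap is attributed forward to the earlier event
def goC (w : Int) (evs : List (Int × Int)) : Int :=
  match evs with
  | [] => 0
  | (x, t) :: rest =>
    let w' := if t = -1 then w + 1 else w - 1
    (if w' = 0 then 1 else 0) +
    (match rest with | [] => 0 | (y, _) :: _ => if w' > 0 then y - x else 0) +
    goC w' rest

-- the gap part of goC alone
def gS (w : Int) (evs : List (Int × Int)) : Int :=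
  match evs with
  | [] => 0
  | (x, t) :: rest =>
    let w' := if t = -1 then w + 1 else w - 1
    (match rest with | [] => 0 | (y, _) :: _ => if w' > 0 then y - x else 0) + gS w' rest

def levelsFrom (w : Int) (evs : List (Int × Int)) : List Int :=
  match evs with
  | [] => []
  | (_, t) :: rest =>
    let w' := if t = -1 then w + 1 else w - 1
    w' :: levelsFrom w' rest

lemma levels_foldl (evs : List (Int × Int)) : ∀ (acc : List Int) (w : Int),
    (evs.foldl (fun (st : List Int × Int) e =>
      let lv := st.2 + (if e.2 == -1 then (1 : Int) else -1)
      (st.1 ++ [lv], lv)) (acc, w)).1 = acc ++ levelsFrom w evs := by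
  induction evs with
  | nil => intro acc w; simp [levelsFrom]
  | cons e rest ih =>
    intro acc w
    simp only [List.foldl_cons, levelsFrom]
    rw [ih]
    cases e with | mk x t =>
    by_cases ht : t = -1
    · simp [ht]
    · have hw : w + -1 = w - 1 := by ring
      simp [ht, hw]

lemma length_levelsFrom (evs : List (Int × Int)) : ∀ w, (levelsFrom w evs).length = evs.length := by
  induction evs with
  | nil => intro w; simp [levelsFrom]
  | cons e rest ih => intro w; cases e; simp [levelsFrom, ih]

lemma goC_split (evs : List (Int × Int)) : ∀ w,
    goC w evs = ((levelsFrom w evs).count 0 : Int) + gS w evs := by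
  induction evs with
  | nil => intro w; simp [goC, gS, levelsFrom]
  | cons e rest ih =>
    intro w
    cases e with | mk x t =>
    simp only [goC, gS, levelsFrom, List.count_cons]
    rw [ih]
    by_cases h0 : (if t = -1 then w + 1 else w - 1) = 0
    · simp [h0]
      push_cast
      ring
    · have : ((if t = -1 then w + 1 else w - 1) == 0) = false := by
        simp [h0]
      simp only [this, if_neg h0]
      push_cast
      ring

-- index-based gap sum matching B's scan
def gapsum (events : List (Int × Int)) (levels : List Int) (n i : Nat) : Int :=
  if i + 1 < n then
    (if levels.getD i 0 > 0 then (events.getD (i + 1) (0, 0)).1 - (events.getD i (0, 0)).1 else 0)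
      + gapsum events levels n (i + 1)
  else 0
termination_by n - i

lemma gapsum_eq_gS (events : List (Int × Int)) (levels : List Int) :
    ∀ (evs : List (Int × Int)) (w : Int) (i : Nat),
    events.drop i = evs → levels.drop i = levelsFrom w evs → levels.length = events.length →
    gapsum events levels events.length i = gS w evs := by
  intro evs
  induction evs with
  | nil =>
    intro w i he hl hlen
    have hle : events.length ≤ i := by
      have := List.drop_eq_nil_iff.mp he; omega
    rw [gapsum, if_neg (by omega : ¬ i + 1 < events.length)]
    simp [gS]
  | cons e rest ih =>
    intro w i he hl hlen
    cases e with | mk x t =>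
    have hi : i < events.length := by
      by_contra hcon
      rw [List.drop_eq_nil_of_le (by omega)] at he
      exact List.cons_ne_nil _ _ he.symm
    have hsplit : events.drop i = events[i] :: events.drop (i + 1) :=
      List.drop_eq_getElem_cons hi
    rw [hsplit] at he
    have hev : events[i] = (x, t) := (List.cons.injEq _ _ _ _ ▸ he).1
    have hrest : events.drop (i + 1) = rest := (List.cons.injEq _ _ _ _ ▸ he).2
    have hil : i < levels.length := by omega
    have hlsplit : levels.drop i = levels[i] :: levels.drop (i + 1) :=
      List.drop_eq_getElem_cons hil
    simp only [levelsFrom] at hl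
    rw [hlsplit] at hl
    have hlv : levels[i] = (if t = -1 then w + 1 else w - 1) := (List.cons.injEq _ _ _ _ ▸ hl).1
    have hlrest : levels.drop (i + 1) = levelsFrom (if t = -1 then w + 1 else w - 1) rest :=
      (List.cons.injEq _ _ _ _ ▸ hl).2
    have hgetE : events.getD i (0, 0) = (x, t) := by
      rw [List.getD_eq_getElem _ _ hi, hev]
    have hgetL : levels.getD i 0 = (if t = -1 then w + 1 else w - 1) := by
      rw [List.getD_eq_getElem _ _ hil, hlv]
    rw [gapsum]
    cases rest with
    | nil =>
      have hn : ¬ i + 1 < events.length := by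
        have := congrArg List.length hrest
        simp [List.length_drop] at this
        omega
      simp [hn, gS]
    | cons f r2 =>
      cases f with | mk y s =>
      have hi1 : i + 1 < events.length := by
        have := congrArg List.length hrest
        simp [List.length_drop] at this
        omega
      have hgetE1 : events.getD (i + 1) (0, 0) = (y, s) := by
        have hsp : events.drop (i + 1) = events[i + 1] :: events.drop (i + 2) :=
          List.drop_eq_getElem_cons hi1
        have h2 : events[i + 1] :: events.drop (i + 2) = (y, s) :: r2 := by
          rw [← hsp, hrest]
        rw [List.getD_eq_getElem _ _ hi1, (List.cons_eq_cons.mp h2).1]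
      rw [if_pos hi1,
          ih (if t = -1 then w + 1 else w - 1) (i + 1) hrest hlrest hlen]
      simp only [gS, hgetE, hgetE1, hgetL]

lemma inner_key (events : List (Int × Int)) (levels : List Int) :
    ∀ (m j : Nat), events.length - j ≤ m → j < events.length → levels.getD j 0 > 0 →
    altInner levels events.length j < events.length ∧
    (events.getD (min (altInner levels events.length j + 1) (events.length - 1)) (0, 0)).1
      - (events.getD j (0, 0)).1
      + gapsum events levels events.length (altInner levels events.length j + 1)
      = gapsum events levels events.length j := by
  intro m
  induction m with
  | zero => intro j hm hj _; omega
  | succ m ih =>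
    intro j hm hj hpos
    rw [altInner]
    split_ifs with hc
    · obtain ⟨hlt, heq⟩ := ih (j + 1) (by omega) hc.1 hc.2
      refine ⟨hlt, ?_⟩
      have hgj : gapsum events levels events.length j =
          ((events.getD (j + 1) (0, 0)).1 - (events.getD j (0, 0)).1)
            + gapsum events levels events.length (j + 1) := by
        rw [gapsum, if_pos hc.1, if_pos hpos]
      omega
    · refine ⟨hj, ?_⟩
      by_cases h1 : j + 1 < events.length
      · have hmin : min (j + 1) (events.length - 1) = j + 1 := by omega
        rw [hmin]
        have hgj : gapsum events levels events.length j =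
            ((events.getD (j + 1) (0, 0)).1 - (events.getD j (0, 0)).1)
              + gapsum events levels events.length (j + 1) := by
          rw [gapsum, if_pos h1, if_pos hpos]
        omega
      · have hmin : min (j + 1) (events.length - 1) = j := by omega
        rw [hmin]
        have hgj : gapsum events levels events.length j = 0 := by
          rw [gapsum, if_neg h1]
        have hgj1 : gapsum events levels events.length (j + 1) = 0 := by
          rw [gapsum, if_neg (by omega : ¬ j + 1 + 1 < events.length)]
        omega

lemma outer_eq (events : List (Int × Int)) (levels : List Int) :
    ∀ (m i : Nat) (cnt : Int), events.length - i ≤ m →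
    altOuter events levels events.length i cnt = cnt + gapsum events levels events.length i := by
  intro m
  induction m with
  | zero =>
    intro i cnt hm
    rw [altOuter, dif_neg (by omega : ¬ i < events.length), gapsum,
        if_neg (by omega : ¬ i + 1 < events.length)]
    ring
  | succ m ih =>
    intro i cnt hm
    rw [altOuter]
    split_ifs with hi hpos
    · obtain ⟨hlt, heq⟩ := inner_key events levels (events.length - i) i (by omega) hi hpos
      have hge := altInner_ge levels events.length (events.length - i) i (by omega)
      rw [ih (altInner levels events.length i + 1) _ (by omega)]
      omega
    · rw [ih (i + 1) cnt (by omega)]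
      conv_rhs => rw [gapsum]
      by_cases h1 : i + 1 < events.length
      · rw [if_pos h1, if_neg hpos]
        ring
      · rw [if_neg h1]
        rw [show gapsum events levels events.length (i + 1) = 0 by
          rw [gapsum, if_neg (by omega : ¬ i + 1 + 1 < events.length)]]
    · rw [gapsum, if_neg (by omega : ¬ i + 1 < events.length)]
      ring

lemma A_loop (events : List (Int × Int)) : ∀ (m k : Nat) (cnt w : Int),
    events.length - k = m →
    ((PySem.List.pyRange (k : Int) (events.length : Int) 1).foldl (leftstudentsStep events) (cnt, w)).1
    = cnt + (if w > 0 ∧ k < events.length then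
        (PySem.List.pyGetD events (k : Int) (0, 0)).1 - (PySem.List.pyGetD events ((k : Int) - 1) (0, 0)).1
      else 0) + goC w (events.drop k) := by
  intro m
  induction m with
  | zero =>
    intro k cnt w hm
    have hk : events.length ≤ k := by omega
    rw [PySem.List.pyRange_one_eq_nil (by exact_mod_cast hk)]
    simp [List.drop_eq_nil_of_le hk, goC]
    omega
  | succ m ih =>
    intro k cnt w hm
    have hk : k < events.length := by omega
    rw [PySem.List.pyRange_one_cons (by exact_mod_cast hk), List.foldl_cons]
    rcases hp : events[k] with ⟨ex, et⟩
    have hgkp : PySem.List.pyGetD events (k : Int) (0, 0) = (ex, et) := by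
      rw [PySem.List.pyGetD_eq_getElem events (0, 0) (by omega) (by exact_mod_cast hk)]
      simp [hp]
    have hstep : leftstudentsStep events (cnt, w) (k : Int) =
        ((if (if et == -1 then w + 1 else w - 1) == 0 then
            (if w > 0 then cnt + (ex - (PySem.List.pyGetD events ((k : Int) - 1) (0, 0)).1) else cnt) + 1
          else (if w > 0 then cnt + (ex - (PySem.List.pyGetD events ((k : Int) - 1) (0, 0)).1) else cnt)),
         (if et == -1 then w + 1 else w - 1)) := by
      simp only [leftstudentsStep, hgkp]
    have hfst : (PySem.List.pyGetD events (k : Int) (0, 0)).1 = ex := by rw [hgkp]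
    rw [hstep, hfst]
    rw [show ((k : Int) + 1) = (((k + 1 : Nat)) : Int) by push_cast; ring,
        ih (k + 1) _ _ (by omega)]
    have hdrop : events.drop k = (ex, et) :: events.drop (k + 1) := by
      rw [List.drop_eq_getElem_cons hk, hp]
    rw [hdrop]
    have hprev : (PySem.List.pyGetD events (((k + 1 : Nat) : Int) - 1) (0, 0)).1 = ex := by
      rw [show (((k + 1 : Nat) : Int) - 1) = (k : Int) by push_cast; ring, hgkp]
    rw [hprev]
    by_cases hk1 : k + 1 < events.length
    · rcases hq : events[k + 1] with ⟨ey, es⟩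
      have hdrop1 : events.drop (k + 1) = (ey, es) :: events.drop (k + 2) := by
        rw [List.drop_eq_getElem_cons hk1, hq]
      have hgk1 : (PySem.List.pyGetD events ((k + 1 : Nat) : Int) (0, 0)).1 = ey := by
        rw [PySem.List.pyGetD_eq_getElem events (0, 0) (by omega) (by exact_mod_cast hk1)]
        simp [hq]
      rw [hdrop1, hgk1]
      have hgoC : goC w ((ex, et) :: (ey, es) :: events.drop (k + 2)) =
          (if (if et = -1 then w + 1 else w - 1) = 0 then 1 else 0) +
          (if (if et = -1 then w + 1 else w - 1) > 0 then ey - ex else 0) +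
          goC (if et = -1 then w + 1 else w - 1) ((ey, es) :: events.drop (k + 2)) := rfl
      rw [hgoC]
      simp only [beq_iff_eq]
      split_ifs <;> omega
    · have hdrop1 : events.drop (k + 1) = [] := List.drop_eq_nil_of_le (by omega)
      rw [hdrop1]
      have hgoC : goC w [(ex, et)] =
          (if (if et = -1 then w + 1 else w - 1) = 0 then 1 else 0) + 0 +
          goC (if et = -1 then w + 1 else w - 1) [] := rfl
      rw [hgoC]
      simp only [beq_iff_eq]
      split_ifs <;> omega

-- ===== VERDICT (by name: the statement is the Claim_ definition above) =====
theorem leftstudents_spec : Claim_equal_leftstudents := by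
  unfold Claim_equal_leftstudents
  intro students teachers events _hdom
  unfold Spec_leftstudents
  have hA := A_loop events events.length 0 0 0 (by omega)
  simp only [Nat.cast_zero, List.drop_zero] at hA
  rw [if_neg (by omega : ¬((0 : Int) > 0 ∧ 0 < events.length))] at hA
  have hlev := levels_foldl events [] 0
  simp only [List.nil_append] at hlev
  have hlen : (levelsFrom 0 events).length = events.length := length_levelsFrom events 0
  have hB := outer_eq events (levelsFrom 0 events) events.length 0
      (((levelsFrom 0 events).count 0 : Int)) (by omega)
  have hgs := gapsum_eq_gS events (levelsFrom 0 events) events 0 0 (by simp) (by simp) hlen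
  have hsplit := goC_split events 0
  simp only [leftstudents, leftstudents_alt, hlev]
  rw [hB, hgs]
  omega
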